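-- pv_equiv track=rewrite | github.com/MrBrantCode/unitest_baseline | mut_generate/mist_train_cf/cf_82142/solution.py | EvenSquaredOddCubedProduct
-- ===== SOURCE A (Python) =====
-- def EvenSquaredOddCubedProduct(numbers):
--     """
--     Calculate the sum of squares of even integers and the product of cubes of odd integers in a given array.
--
--     Args:
--         numbers (list): A list of integers.
--
--     Returns:
--         tuple: A tuple containing the sum of squares of even integers and the product of cubes of odd integers.
--     """
--     sum_even = 0
--     product_odd = 1
--     for number in numbers:
--         if number % 2 == 0:
--             sum_even += number * number
--         else:
--             product_odd *= number * number * number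
--     return sum_even, product_odd
-- ===== SOURCE B (Python) =====
-- def EvenSquaredOddCubedProduct(numbers):
--     # Divide-and-conquer tree reduction: combine (sum, product) of halves.
--     def go(lo, hi):
--         if hi - lo <= 0:
--             return 0, 1
--         if hi - lo == 1:
--             n = numbers[lo]
--             if n % 2 == 0:
--                 return n * n, 1
--             return 0, n * n * n
--         mid = (lo + hi) // 2
--         s1, p1 = go(lo, mid)
--         s2, p2 = go(mid, hi)
--         return s1 + s2, p1 * p2
--     return go(0, len(numbers))
-- ===== Notes on version B (the rewrite author's own statement) =====
-- stated objective: alternative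
-- what changed: Replaced A's single left-to-right branched accumulator loop with a divide-and-conquer tree reduction over index ranges that combines (sum, product) pairs of the two halves; correct because integer addition and multiplication are associative and commutative.
import Mathlib
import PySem

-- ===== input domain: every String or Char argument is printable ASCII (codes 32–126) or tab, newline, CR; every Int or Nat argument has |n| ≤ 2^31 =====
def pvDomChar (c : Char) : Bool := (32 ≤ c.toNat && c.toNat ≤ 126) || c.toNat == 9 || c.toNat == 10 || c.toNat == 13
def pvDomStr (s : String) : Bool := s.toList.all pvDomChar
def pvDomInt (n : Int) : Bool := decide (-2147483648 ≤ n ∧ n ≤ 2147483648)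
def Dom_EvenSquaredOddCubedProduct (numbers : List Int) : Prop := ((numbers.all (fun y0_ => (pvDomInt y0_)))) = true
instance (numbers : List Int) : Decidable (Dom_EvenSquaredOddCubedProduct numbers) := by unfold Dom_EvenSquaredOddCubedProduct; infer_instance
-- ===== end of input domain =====

-- B replaces A's single branched accumulator loop by a divide-and-conquer tree
-- reduction over index ranges (correct by associativity/commutativity of + and *).

-- ===== PORT A =====
def EvenSquaredOddCubedProduct (numbers : List Int) : Int × Int :=
  numbers.foldl
    (fun st number =>
      if PySem.Int.mod number 2 = 0 then (st.1 + number * number, st.2)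
      else (st.1, st.2 * (number * number * number)))
    (0, 1)

-- ===== PORT B =====
-- go(lo, hi) of Source B; `fuel` is a totalization guard (each call halves the range,
-- so fuel = hi - lo is always enough); the unreachable `none` branch returns (0, 1).
def pvGoB (numbers : List Int) : Nat → Int → Int → Int × Int
  | 0, _, _ => (0, 1)
  | fuel + 1, lo, hi =>
    if hi - lo ≤ 0 then (0, 1)
    else if hi - lo = 1 then
      match PySem.List.pyGet? numbers lo with
      | some n => if PySem.Int.mod n 2 = 0 then (n * n, 1) else (0, n * n * n)
      | none => (0, 1)
    else
      let mid := PySem.Int.floordiv (lo + hi) 2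
      let l := pvGoB numbers fuel lo mid
      let r := pvGoB numbers fuel mid hi
      (l.1 + r.1, l.2 * r.2)

def EvenSquaredOddCubedProduct_alt (numbers : List Int) : Int × Int :=
  pvGoB numbers numbers.length 0 (numbers.length : Int)

-- ===== PRECONDITION & SPEC =====
def Spec_EvenSquaredOddCubedProduct (numbers : List Int) (out : Int × Int) : Prop := out = EvenSquaredOddCubedProduct_alt numbers
instance (numbers : List Int) (out : Int × Int) : Decidable (Spec_EvenSquaredOddCubedProduct numbers out) := by unfold Spec_EvenSquaredOddCubedProduct; infer_instance

-- ===== CLAIM =====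
def Claim_equal_EvenSquaredOddCubedProduct : Prop := ∀ (numbers : List Int), Dom_EvenSquaredOddCubedProduct numbers → Spec_EvenSquaredOddCubedProduct numbers (EvenSquaredOddCubedProduct numbers)

-- ===== LEMMAS AND PROOFS =====

/-- The (sum of even squares, product of odd cubes) of a segment, as map/sum/prod. -/
def pvM (xs : List Int) : Int × Int :=
  ((xs.map (fun n => if PySem.Int.mod n 2 = 0 then n * n else 0)).sum,
   (xs.map (fun n => if PySem.Int.mod n 2 = 0 then 1 else n * n * n)).prod)

lemma pvM_append (a b : List Int) :
    pvM (a ++ b) = ((pvM a).1 + (pvM b).1, (pvM a).2 * (pvM b).2) := by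
  simp [pvM]

lemma pvGoB_eq (numbers : List Int) :
    ∀ (k : Nat) (lo hi : Int), (hi - lo).toNat ≤ k → 0 ≤ lo → lo ≤ hi →
      hi ≤ (numbers.length : Int) →
      pvGoB numbers k lo hi = pvM ((numbers.drop lo.toNat).take (hi - lo).toNat) := by
  intro k
  induction k with
  | zero =>
    intro lo hi hk h0 hle hlen
    simp [pvGoB, pvM, show (hi - lo).toNat = 0 by omega]
  | succ k ih =>
    intro lo hi hk h0 hle hlen
    rw [pvGoB]
    by_cases hz : hi - lo ≤ 0
    · simp only [if_pos hz]
      simp [pvM, show (hi - lo).toNat = 0 by omega]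
    · by_cases h1 : hi - lo = 1
      · have hlt : lo.toNat < numbers.length := by omega
        rw [if_neg hz, if_pos h1, PySem.List.pyGet?_of_nonneg numbers h0,
            List.getElem?_eq_getElem hlt]
        have htake : (numbers.drop lo.toNat).take (hi - lo).toNat
            = [numbers[lo.toNat]] := by
          have : (hi - lo).toNat = 1 := by omega
          rw [this]
          rw [List.take_one]
          simp [List.head?_drop, List.getElem?_eq_getElem hlt]
        rw [htake]
        simp only [pvM, List.map_cons, List.map_nil, List.sum_cons, List.sum_nil,
          List.prod_cons, List.prod_nil, add_zero, mul_one]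
        split_ifs <;> rfl
      · have h2 : 2 ≤ hi - lo := by omega
        rw [if_neg hz, if_neg h1]
        simp only []
        have hmid : PySem.Int.floordiv (lo + hi) 2 = (lo + hi) / 2 :=
          PySem.Int.floordiv_eq_ediv_of_pos (by omega)
        set mid := PySem.Int.floordiv (lo + hi) 2 with hm
        have hb1 : lo < mid := by omega
        have hb2 : mid < hi := by omega
        rw [ih lo mid (by omega) h0 (by omega) (by omega),
            ih mid hi (by omega) (by omega) (by omega) hlen]
        have hsplit : (numbers.drop lo.toNat).take (hi - lo).toNat
            = (numbers.drop lo.toNat).take (mid - lo).toNat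
              ++ (numbers.drop mid.toNat).take (hi - mid).toNat := by
          have h3 : (hi - lo).toNat = (mid - lo).toNat + (hi - mid).toNat := by omega
          have h4 : (numbers.drop lo.toNat).drop (mid - lo).toNat
              = numbers.drop mid.toNat := by
            rw [List.drop_drop]
            congr 1
            omega
          rw [h3, List.take_add, h4]
        rw [hsplit, pvM_append]

lemma pvFoldA (numbers : List Int) (s p : Int) :
    numbers.foldl
      (fun st number =>
        if PySem.Int.mod number 2 = 0 then (st.1 + number * number, st.2)
        else (st.1, st.2 * (number * number * number)))
      (s, p)
    = (s + (pvM numbers).1, p * (pvM numbers).2) := by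
  induction numbers generalizing s p with
  | nil => simp [pvM]
  | cons x xs ih =>
    by_cases h : PySem.Int.mod x 2 = 0 <;>
      simp only [List.foldl_cons, h, if_true, if_false, pvM, List.map_cons,
        List.sum_cons, List.prod_cons, ih]
    all_goals simp; ring_nf

-- ===== VERDICT =====
theorem EvenSquaredOddCubedProduct_spec : Claim_equal_EvenSquaredOddCubedProduct := by
  intro numbers _
  unfold Spec_EvenSquaredOddCubedProduct EvenSquaredOddCubedProduct EvenSquaredOddCubedProduct_alt
  rw [pvFoldA, pvGoB_eq numbers numbers.length 0 (numbers.length : Int)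
      (by omega) (by omega) (by omega) (by omega)]
  simp
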